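-- pv_equiv track=rewrite | github.com/OwenCoonahan/queue-analysis-project | tools/transmission_data.py | _map_poi_to_zone
-- ===== SOURCE A (Python) =====
-- def _map_poi_to_zone(region: str, poi: str, state: str = None) -> str:
--     """Map POI to transmission zone."""
--     poi_lower = (poi or '').lower()
--     state_upper = (state or '').upper()
--
--     # ERCOT zone mapping
--     if region == 'ERCOT':
--         if any(x in poi_lower for x in ['panhandle', 'amarillo', 'lubbock']):
--             return 'PANHANDLE'
--         elif any(x in poi_lower for x in ['houston', 'harris', 'galveston']):
--             return 'HOUSTON'
--         elif any(x in poi_lower for x in ['dallas', 'fort worth', 'denton']):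
--             return 'NORTH'
--         elif any(x in poi_lower for x in ['corpus', 'brownsville', 'mcallen']):
--             return 'SOUTH'
--         elif any(x in poi_lower for x in ['midland', 'odessa', 'permian', 'pecos']):
--             return 'WEST'
--         else:
--             return 'WEST'  # Default to West (most congested)
--
--     # NYISO
--     elif region == 'NYISO':
--         if any(x in poi_lower for x in ['nyc', 'new york city', 'brooklyn', 'queens']):
--             return 'NYC'
--         elif any(x in poi_lower for x in ['long island', 'nassau', 'suffolk']):
--             return 'LI'
--         elif any(x in poi_lower for x in ['hudson', 'westchester', 'rockland']):
--             return 'HUDSON'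
--         elif any(x in poi_lower for x in ['buffalo', 'rochester', 'niagara']):
--             return 'WEST'
--         else:
--             return 'CENTRAL'
--
--     # PJM
--     elif region == 'PJM':
--         if state_upper in ['DE', 'MD'] or 'delmarva' in poi_lower:
--             return 'DPL'
--         elif state_upper in ['VA', 'NC'] or 'dominion' in poi_lower:
--             return 'DOM'
--         elif state_upper in ['IL'] or 'comed' in poi_lower:
--             return 'COMED'
--         elif state_upper in ['OH', 'WV', 'KY'] or 'aep' in poi_lower:
--             return 'AEP'
--         elif 'emaac' in poi_lower or state_upper in ['NJ', 'PA']: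
--             return 'EMAAC'
--         else:
--             return 'WEST'
--
--     # CAISO
--     elif region == 'CAISO':
--         if any(x in poi_lower for x in ['san diego', 'imperial', 'riverside']):
--             return 'SP15'
--         elif any(x in poi_lower for x in ['san francisco', 'oakland', 'sacramento']):
--             return 'NP15'
--         else:
--             return 'ZP26'
--
--     # Default
--     return 'CENTRAL'
-- ===== SOURCE B (Python) =====
-- # Collect-then-select: gather every matching (rank, zone) candidate (keyword hits
-- # plus a state-code hit), then return the zone of the minimum-rank candidate;
-- # per-region default when nothing matches. No ordered rule chain, no early exit.
--
-- _POI_ZONES = {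
--     'ERCOT': {
--         'panhandle': (0, 'PANHANDLE'), 'amarillo': (0, 'PANHANDLE'), 'lubbock': (0, 'PANHANDLE'),
--         'houston': (1, 'HOUSTON'), 'harris': (1, 'HOUSTON'), 'galveston': (1, 'HOUSTON'),
--         'dallas': (2, 'NORTH'), 'fort worth': (2, 'NORTH'), 'denton': (2, 'NORTH'),
--         'corpus': (3, 'SOUTH'), 'brownsville': (3, 'SOUTH'), 'mcallen': (3, 'SOUTH'),
--         'midland': (4, 'WEST'), 'odessa': (4, 'WEST'), 'permian': (4, 'WEST'), 'pecos': (4, 'WEST'),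
--     },
--     'NYISO': {
--         'nyc': (0, 'NYC'), 'new york city': (0, 'NYC'), 'brooklyn': (0, 'NYC'), 'queens': (0, 'NYC'),
--         'long island': (1, 'LI'), 'nassau': (1, 'LI'), 'suffolk': (1, 'LI'),
--         'hudson': (2, 'HUDSON'), 'westchester': (2, 'HUDSON'), 'rockland': (2, 'HUDSON'),
--         'buffalo': (3, 'WEST'), 'rochester': (3, 'WEST'), 'niagara': (3, 'WEST'),
--     },
--     'PJM': {
--         'delmarva': (0, 'DPL'), 'dominion': (1, 'DOM'), 'comed': (2, 'COMED'),
--         'aep': (3, 'AEP'), 'emaac': (4, 'EMAAC'),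
--     },
--     'CAISO': {
--         'san diego': (0, 'SP15'), 'imperial': (0, 'SP15'), 'riverside': (0, 'SP15'),
--         'san francisco': (1, 'NP15'), 'oakland': (1, 'NP15'), 'sacramento': (1, 'NP15'),
--     },
-- }
--
-- _STATE_ZONES = {
--     'PJM': {
--         'DE': (0, 'DPL'), 'MD': (0, 'DPL'),
--         'VA': (1, 'DOM'), 'NC': (1, 'DOM'),
--         'IL': (2, 'COMED'),
--         'OH': (3, 'AEP'), 'WV': (3, 'AEP'), 'KY': (3, 'AEP'),
--         'NJ': (4, 'EMAAC'), 'PA': (4, 'EMAAC'),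
--     },
-- }
--
-- _DEFAULT_ZONES = {'ERCOT': 'WEST', 'NYISO': 'CENTRAL', 'PJM': 'WEST', 'CAISO': 'ZP26'}
--
--
-- def _map_poi_to_zone(region: str, poi: str, state: str = None) -> str:
--     """Map POI to transmission zone."""
--     poi_lower = (poi or '').lower()
--     state_upper = (state or '').upper()
--     hits = [rz for kw, rz in _POI_ZONES.get(region, {}).items() if kw in poi_lower]
--     srz = _STATE_ZONES.get(region, {}).get(state_upper)
--     if srz is not None:
--         hits.append(srz)
--     best = min(hits, key=lambda rz: rz[0], default=None)
--     if best is not None: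
--         return best[1]
--     return _DEFAULT_ZONES.get(region, 'CENTRAL')
-- ===== Notes on version B (the rewrite author's own statement) =====
-- stated objective: alternative
-- what changed: Instead of A's ordered first-match if/elif chains, B scans all keyword/state candidates with no early exit, collects every matching (priority, zone) hit into a list, and selects the minimum-priority hit (per-region default when none match); correctness relies on each region's priorities mirroring A's rule order.
import Mathlib
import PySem

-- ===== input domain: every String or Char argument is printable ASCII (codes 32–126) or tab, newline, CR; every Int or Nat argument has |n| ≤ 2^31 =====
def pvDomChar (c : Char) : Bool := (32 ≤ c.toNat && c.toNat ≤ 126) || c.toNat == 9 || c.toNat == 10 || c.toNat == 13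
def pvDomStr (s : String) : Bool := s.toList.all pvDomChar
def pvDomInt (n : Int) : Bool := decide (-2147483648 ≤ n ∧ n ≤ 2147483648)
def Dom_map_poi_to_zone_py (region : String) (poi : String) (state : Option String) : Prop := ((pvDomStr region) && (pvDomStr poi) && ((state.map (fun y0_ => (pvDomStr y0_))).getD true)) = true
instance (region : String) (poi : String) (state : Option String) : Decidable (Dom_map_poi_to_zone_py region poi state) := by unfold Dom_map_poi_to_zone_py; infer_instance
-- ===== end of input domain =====

-- B replaces A's ordered first-match if/elif chains by a collect-then-select pass: every matching
-- (priority, zone) candidate is gathered, and the minimum-priority one wins (objective: alternative).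

-- ===== PORT A =====
-- literal transliteration of A's nested if/elif chains; '(poi or "").lower()' is lower of poi
-- (poi falsy only when "", same result) and '(state or "").upper()' is upper of state.getD "".
def map_poi_to_zone_py (region : String) (poi : String) (state : Option String) : String :=
  let poiLower := PySem.Str.lower poi
  let stateUpper := PySem.Str.upper (state.getD "")
  if region == "ERCOT" then
    if ["panhandle", "amarillo", "lubbock"].any (fun x => PySem.Str.isIn x poiLower) then "PANHANDLE"
    else if ["houston", "harris", "galveston"].any (fun x => PySem.Str.isIn x poiLower) then "HOUSTON"
    else if ["dallas", "fort worth", "denton"].any (fun x => PySem.Str.isIn x poiLower) then "NORTH"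
    else if ["corpus", "brownsville", "mcallen"].any (fun x => PySem.Str.isIn x poiLower) then "SOUTH"
    else if ["midland", "odessa", "permian", "pecos"].any (fun x => PySem.Str.isIn x poiLower) then "WEST"
    else "WEST"
  else if region == "NYISO" then
    if ["nyc", "new york city", "brooklyn", "queens"].any (fun x => PySem.Str.isIn x poiLower) then "NYC"
    else if ["long island", "nassau", "suffolk"].any (fun x => PySem.Str.isIn x poiLower) then "LI"
    else if ["hudson", "westchester", "rockland"].any (fun x => PySem.Str.isIn x poiLower) then "HUDSON"
    else if ["buffalo", "rochester", "niagara"].any (fun x => PySem.Str.isIn x poiLower) then "WEST"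
    else "CENTRAL"
  else if region == "PJM" then
    if ["DE", "MD"].contains stateUpper || PySem.Str.isIn "delmarva" poiLower then "DPL"
    else if ["VA", "NC"].contains stateUpper || PySem.Str.isIn "dominion" poiLower then "DOM"
    else if ["IL"].contains stateUpper || PySem.Str.isIn "comed" poiLower then "COMED"
    else if ["OH", "WV", "KY"].contains stateUpper || PySem.Str.isIn "aep" poiLower then "AEP"
    else if PySem.Str.isIn "emaac" poiLower || ["NJ", "PA"].contains stateUpper then "EMAAC"
    else "WEST"
  else if region == "CAISO" then
    if ["san diego", "imperial", "riverside"].any (fun x => PySem.Str.isIn x poiLower) then "SP15"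
    else if ["san francisco", "oakland", "sacramento"].any (fun x => PySem.Str.isIn x poiLower) then "NP15"
    else "ZP26"
  else "CENTRAL"

-- ===== PORT B =====
-- Source B's module-level tables: keyword -> (priority, zone) per region, state -> (priority, zone), defaults
def ercotPoi : PySem.Dict String (Int × String) :=
  PySem.Dict.ofList
    [ ("panhandle", (0, "PANHANDLE")), ("amarillo", (0, "PANHANDLE")), ("lubbock", (0, "PANHANDLE")),
      ("houston", (1, "HOUSTON")), ("harris", (1, "HOUSTON")), ("galveston", (1, "HOUSTON")),
      ("dallas", (2, "NORTH")), ("fort worth", (2, "NORTH")), ("denton", (2, "NORTH")),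
      ("corpus", (3, "SOUTH")), ("brownsville", (3, "SOUTH")), ("mcallen", (3, "SOUTH")),
      ("midland", (4, "WEST")), ("odessa", (4, "WEST")), ("permian", (4, "WEST")), ("pecos", (4, "WEST")) ]

def nyisoPoi : PySem.Dict String (Int × String) :=
  PySem.Dict.ofList
    [ ("nyc", (0, "NYC")), ("new york city", (0, "NYC")), ("brooklyn", (0, "NYC")), ("queens", (0, "NYC")),
      ("long island", (1, "LI")), ("nassau", (1, "LI")), ("suffolk", (1, "LI")),
      ("hudson", (2, "HUDSON")), ("westchester", (2, "HUDSON")), ("rockland", (2, "HUDSON")),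
      ("buffalo", (3, "WEST")), ("rochester", (3, "WEST")), ("niagara", (3, "WEST")) ]

def pjmPoi : PySem.Dict String (Int × String) :=
  PySem.Dict.ofList
    [ ("delmarva", (0, "DPL")), ("dominion", (1, "DOM")), ("comed", (2, "COMED")),
      ("aep", (3, "AEP")), ("emaac", (4, "EMAAC")) ]

def caisoPoi : PySem.Dict String (Int × String) :=
  PySem.Dict.ofList
    [ ("san diego", (0, "SP15")), ("imperial", (0, "SP15")), ("riverside", (0, "SP15")),
      ("san francisco", (1, "NP15")), ("oakland", (1, "NP15")), ("sacramento", (1, "NP15")) ]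

def pjmStates : PySem.Dict String (Int × String) :=
  PySem.Dict.ofList
    [ ("DE", (0, "DPL")), ("MD", (0, "DPL")),
      ("VA", (1, "DOM")), ("NC", (1, "DOM")),
      ("IL", (2, "COMED")),
      ("OH", (3, "AEP")), ("WV", (3, "AEP")), ("KY", (3, "AEP")),
      ("NJ", (4, "EMAAC")), ("PA", (4, "EMAAC")) ]

def poiZones : PySem.Dict String (PySem.Dict String (Int × String)) :=
  PySem.Dict.ofList
    [ ("ERCOT", ercotPoi), ("NYISO", nyisoPoi), ("PJM", pjmPoi), ("CAISO", caisoPoi) ]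

def stateZones : PySem.Dict String (PySem.Dict String (Int × String)) :=
  PySem.Dict.ofList [ ("PJM", pjmStates) ]

def defaultZones : PySem.Dict String String :=
  PySem.Dict.ofList [("ERCOT", "WEST"), ("NYISO", "CENTRAL"), ("PJM", "WEST"), ("CAISO", "ZP26")]

-- Source B's body: comprehension over .items() (filter + take the value), optional state hit appended,
-- min(hits, key=rank, default=None) = PySem.List.min?, else the per-region default.
def map_poi_to_zone_py_alt (region : String) (poi : String) (state : Option String) : String :=
  let poiLower := PySem.Str.lower poi
  let stateUpper := PySem.Str.upper (state.getD "")
  let hits := (((poiZones.get? region).getD PySem.Dict.empty).items.filter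
      (fun p => PySem.Str.isIn p.1 poiLower)).map Prod.snd
  let hits := match ((stateZones.get? region).getD PySem.Dict.empty).get? stateUpper with
    | some rz => hits ++ [rz]
    | none => hits
  match PySem.List.min? hits (fun rz => rz.1) with
  | some rz => rz.2
  | none => (defaultZones.get? region).getD "CENTRAL"

-- ===== PRECONDITION & SPEC =====
def Spec_map_poi_to_zone_py (region : String) (poi : String) (state : Option String) (out : String) : Prop := out = map_poi_to_zone_py_alt region poi state
instance (region : String) (poi : String) (state : Option String) (out : String) : Decidable (Spec_map_poi_to_zone_py region poi state out) := by unfold Spec_map_poi_to_zone_py; infer_instance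

-- ===== CLAIM (what is proved, stated in full; the proofs are below) =====
def Claim_equal_map_poi_to_zone_py : Prop := ∀ (region : String) (poi : String) (state : Option String), Dom_map_poi_to_zone_py region poi state → Spec_map_poi_to_zone_py region poi state (map_poi_to_zone_py region poi state)

-- ===== LEMMAS AND PROOFS =====
-- min?'s fold keeps 'some m0' once every later element has rank ≥ m0.1
theorem foldl_min_stay {f : Option (Int × String) → Int × String → Option (Int × String)}
    (hf : ∀ m x, f (some m) x = if x.1 < m.1 then some x else some m)
    (m0 : Int × String) (t : List (Int × String))
    (h : ∀ y ∈ t, m0.1 ≤ y.1) : t.foldl f (some m0) = some m0 := by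
  induction t with
  | nil => rfl
  | cons y t ih =>
      have hy : ¬ y.1 < m0.1 := not_lt.mpr (h y (List.mem_cons_self))
      rw [List.foldl_cons, hf, if_neg hy]
      exact ih (fun z hz => h z (List.mem_cons_of_mem _ hz))

-- on a rank-sorted list, Python's min (first extremal) is the head
theorem min?_eq_head?_of_sorted (l : List (Int × String))
    (h : l.Pairwise (fun a b => a.1 ≤ b.1)) :
    PySem.List.min? l (fun rz => rz.1) = l.head? := by
  cases l with
  | nil => rfl
  | cons x t =>
      simp only [PySem.List.min?, List.foldl_cons, List.head?_cons]
      show List.foldl _ (some x) t = some x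
      exact foldl_min_stay (fun m y => rfl) x t (List.pairwise_cons.mp h).1

-- the appended state hit enters min? as one final comparison step
theorem min?_append_singleton (ks : List (Int × String)) (s : Int × String) :
    PySem.List.min? (ks ++ [s]) (fun rz => rz.1) =
      match PySem.List.min? ks (fun rz => rz.1) with
      | none => some s
      | some m => if s.1 < m.1 then some s else some m := by
  rcases hk : PySem.List.min? ks (fun rz => rz.1) with _ | m
  · simp only [PySem.List.min?] at hk
    simp only [PySem.List.min?, List.foldl_append, List.foldl_cons, List.foldl_nil, hk]
  · simp only [PySem.List.min?] at hk
    simp only [PySem.List.min?, List.foldl_append, List.foldl_cons, List.foldl_nil, hk]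

-- rank-sortedness of the filtered-then-projected candidate list, for each region's literal table
theorem pairwise_filter_snd (l : List (String × Int × String))
    (hl : l.Pairwise (fun a b => a.2.1 ≤ b.2.1)) (p : String × Int × String → Bool) :
    ((l.filter p).map Prod.snd).Pairwise (fun a b : Int × String => a.1 ≤ b.1) :=
  (List.Pairwise.sublist List.filter_sublist hl).map Prod.snd (fun _ _ h => h)

-- the candidate list splits along the table's rank groups
theorem head?_filter_append (l1 l2 : List (String × Int × String)) (p : String × Int × String → Bool) :
    ((List.filter p (l1 ++ l2)).map Prod.snd).head? =
      (((l1.filter p).map Prod.snd).head?).or (((l2.filter p).map Prod.snd).head?) := by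
  simp [List.filter_append, List.head?_append]

-- within one rank group (all values equal), the first hit is the group's value iff any keyword matched
theorem head?_filter_group (v : Int × String) (G : List (String × Int × String))
    (p : String × Int × String → Bool) (hv : ∀ x ∈ G, x.2 = v) :
    ((G.filter p).map Prod.snd).head? = if G.any p then some v else none := by
  induction G with
  | nil => rfl
  | cons x t ih =>
      rw [List.filter_cons, List.any_cons]
      cases hp : p x with
      | true => simp [hv x List.mem_cons_self]
      | false =>
          simp only [Bool.false_eq_true, if_false, Bool.false_or]
          exact ih (fun y hy => hv y (List.mem_cons_of_mem _ hy))

-- ===== VERDICT (by name: the statement is the Claim_ definition above) =====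
set_option maxHeartbeats 2000000 in
theorem map_poi_to_zone_py_spec : Claim_equal_map_poi_to_zone_py := by
  intro region poi state _
  unfold Spec_map_poi_to_zone_py map_poi_to_zone_py map_poi_to_zone_py_alt
  simp only []
  by_cases h1 : region = "ERCOT"
  · subst h1
    simp only [beq_self_eq_true, if_true]
    rw [show poiZones.get? "ERCOT" = some ercotPoi from by decide,
        show stateZones.get? "ERCOT" = none from by decide,
        show defaultZones.get? "ERCOT" = some "WEST" from by decide]
    simp only [Option.getD_some, Option.getD_none]
    rw [show (PySem.Dict.empty : PySem.Dict String (Int × String)).get? (PySem.Str.upper (state.getD "")) = none from rfl]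
    simp only []
    rw [min?_eq_head?_of_sorted _ (pairwise_filter_snd ercotPoi.items (by decide) _),
        show ercotPoi.items = ([("panhandle", ((0:Int), "PANHANDLE")), ("amarillo", ((0:Int), "PANHANDLE")), ("lubbock", ((0:Int), "PANHANDLE"))] ++ ([("houston", ((1:Int), "HOUSTON")), ("harris", ((1:Int), "HOUSTON")), ("galveston", ((1:Int), "HOUSTON"))] ++ ([("dallas", ((2:Int), "NORTH")), ("fort worth", ((2:Int), "NORTH")), ("denton", ((2:Int), "NORTH"))] ++ ([("corpus", ((3:Int), "SOUTH")), ("brownsville", ((3:Int), "SOUTH")), ("mcallen", ((3:Int), "SOUTH"))] ++ [("midland", ((4:Int), "WEST")), ("odessa", ((4:Int), "WEST")), ("permian", ((4:Int), "WEST")), ("pecos", ((4:Int), "WEST"))])))) from by decide]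
    simp only [head?_filter_append]
    rw [head?_filter_group ((0:Int), "PANHANDLE") [("panhandle", ((0:Int), "PANHANDLE")), ("amarillo", ((0:Int), "PANHANDLE")), ("lubbock", ((0:Int), "PANHANDLE"))] _ (by decide)]
    rw [head?_filter_group ((1:Int), "HOUSTON") [("houston", ((1:Int), "HOUSTON")), ("harris", ((1:Int), "HOUSTON")), ("galveston", ((1:Int), "HOUSTON"))] _ (by decide)]
    rw [head?_filter_group ((2:Int), "NORTH") [("dallas", ((2:Int), "NORTH")), ("fort worth", ((2:Int), "NORTH")), ("denton", ((2:Int), "NORTH"))] _ (by decide)]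
    rw [head?_filter_group ((3:Int), "SOUTH") [("corpus", ((3:Int), "SOUTH")), ("brownsville", ((3:Int), "SOUTH")), ("mcallen", ((3:Int), "SOUTH"))] _ (by decide)]
    rw [head?_filter_group ((4:Int), "WEST") [("midland", ((4:Int), "WEST")), ("odessa", ((4:Int), "WEST")), ("permian", ((4:Int), "WEST")), ("pecos", ((4:Int), "WEST"))] _ (by decide)]
    simp only [List.any_cons, List.any_nil, Bool.or_false]
    split_ifs <;> simp_all
  by_cases h2 : region = "NYISO"
  · subst h2
    simp only [show (("NYISO" : String) == "ERCOT") = false from by decide, beq_self_eq_true,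
      Bool.false_eq_true, if_false, if_true]
    rw [show poiZones.get? "NYISO" = some nyisoPoi from by decide,
        show stateZones.get? "NYISO" = none from by decide,
        show defaultZones.get? "NYISO" = some "CENTRAL" from by decide]
    simp only [Option.getD_some, Option.getD_none]
    rw [show (PySem.Dict.empty : PySem.Dict String (Int × String)).get? (PySem.Str.upper (state.getD "")) = none from rfl]
    simp only []
    rw [min?_eq_head?_of_sorted _ (pairwise_filter_snd nyisoPoi.items (by decide) _),
        show nyisoPoi.items = ([("nyc", ((0:Int), "NYC")), ("new york city", ((0:Int), "NYC")), ("brooklyn", ((0:Int), "NYC")), ("queens", ((0:Int), "NYC"))] ++ ([("long island", ((1:Int), "LI")), ("nassau", ((1:Int), "LI")), ("suffolk", ((1:Int), "LI"))] ++ ([("hudson", ((2:Int), "HUDSON")), ("westchester", ((2:Int), "HUDSON")), ("rockland", ((2:Int), "HUDSON"))] ++ [("buffalo", ((3:Int), "WEST")), ("rochester", ((3:Int), "WEST")), ("niagara", ((3:Int), "WEST"))]))) from by decide]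
    simp only [head?_filter_append]
    rw [head?_filter_group ((0:Int), "NYC") [("nyc", ((0:Int), "NYC")), ("new york city", ((0:Int), "NYC")), ("brooklyn", ((0:Int), "NYC")), ("queens", ((0:Int), "NYC"))] _ (by decide)]
    rw [head?_filter_group ((1:Int), "LI") [("long island", ((1:Int), "LI")), ("nassau", ((1:Int), "LI")), ("suffolk", ((1:Int), "LI"))] _ (by decide)]
    rw [head?_filter_group ((2:Int), "HUDSON") [("hudson", ((2:Int), "HUDSON")), ("westchester", ((2:Int), "HUDSON")), ("rockland", ((2:Int), "HUDSON"))] _ (by decide)]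
    rw [head?_filter_group ((3:Int), "WEST") [("buffalo", ((3:Int), "WEST")), ("rochester", ((3:Int), "WEST")), ("niagara", ((3:Int), "WEST"))] _ (by decide)]
    simp only [List.any_cons, List.any_nil, Bool.or_false]
    split_ifs <;> simp_all
  by_cases h3 : region = "PJM"
  · subst h3
    simp only [show (("PJM" : String) == "ERCOT") = false from by decide,
      show (("PJM" : String) == "NYISO") = false from by decide, beq_self_eq_true,
      Bool.false_eq_true, if_false, if_true]
    rw [show poiZones.get? "PJM" = some pjmPoi from by decide,
        show stateZones.get? "PJM" = some pjmStates from by decide,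
        show defaultZones.get? "PJM" = some "WEST" from by decide]
    simp only [Option.getD_some]
    by_cases s0 : PySem.Str.upper (state.getD "") = "DE"
    · rw [s0, show pjmStates.get? "DE" = some ((0:Int), "DPL") from by decide]
      simp only []
      rw [min?_append_singleton, min?_eq_head?_of_sorted _ (pairwise_filter_snd pjmPoi.items (by decide) _),
          show pjmPoi.items = ([("delmarva", ((0:Int), "DPL"))] ++ ([("dominion", ((1:Int), "DOM"))] ++ ([("comed", ((2:Int), "COMED"))] ++ ([("aep", ((3:Int), "AEP"))] ++ [("emaac", ((4:Int), "EMAAC"))])))) from by decide]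
      simp only [head?_filter_append]
      rw [head?_filter_group ((0:Int), "DPL") [("delmarva", ((0:Int), "DPL"))] _ (by decide)]
      rw [head?_filter_group ((1:Int), "DOM") [("dominion", ((1:Int), "DOM"))] _ (by decide)]
      rw [head?_filter_group ((2:Int), "COMED") [("comed", ((2:Int), "COMED"))] _ (by decide)]
      rw [head?_filter_group ((3:Int), "AEP") [("aep", ((3:Int), "AEP"))] _ (by decide)]
      rw [head?_filter_group ((4:Int), "EMAAC") [("emaac", ((4:Int), "EMAAC"))] _ (by decide)]
      simp only [List.any_cons, List.any_nil, List.contains_cons, List.contains_nil,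
        show (("DE" : String) == "DE") = true from by decide,
        show (("MD" : String) == "DE") = false from by decide,
        show (("VA" : String) == "DE") = false from by decide,
        show (("NC" : String) == "DE") = false from by decide,
        show (("IL" : String) == "DE") = false from by decide,
        show (("OH" : String) == "DE") = false from by decide,
        show (("WV" : String) == "DE") = false from by decide,
        show (("KY" : String) == "DE") = false from by decide,
        show (("NJ" : String) == "DE") = false from by decide,
        show (("PA" : String) == "DE") = false from by decide,
        Bool.or_false, Bool.false_or, Bool.true_or, Bool.or_true]
      split_ifs <;> simp_all
    by_cases s1 : PySem.Str.upper (state.getD "") = "MD"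
    · rw [s1, show pjmStates.get? "MD" = some ((0:Int), "DPL") from by decide]
      simp only []
      rw [min?_append_singleton, min?_eq_head?_of_sorted _ (pairwise_filter_snd pjmPoi.items (by decide) _),
          show pjmPoi.items = ([("delmarva", ((0:Int), "DPL"))] ++ ([("dominion", ((1:Int), "DOM"))] ++ ([("comed", ((2:Int), "COMED"))] ++ ([("aep", ((3:Int), "AEP"))] ++ [("emaac", ((4:Int), "EMAAC"))])))) from by decide]
      simp only [head?_filter_append]
      rw [head?_filter_group ((0:Int), "DPL") [("delmarva", ((0:Int), "DPL"))] _ (by decide)]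
      rw [head?_filter_group ((1:Int), "DOM") [("dominion", ((1:Int), "DOM"))] _ (by decide)]
      rw [head?_filter_group ((2:Int), "COMED") [("comed", ((2:Int), "COMED"))] _ (by decide)]
      rw [head?_filter_group ((3:Int), "AEP") [("aep", ((3:Int), "AEP"))] _ (by decide)]
      rw [head?_filter_group ((4:Int), "EMAAC") [("emaac", ((4:Int), "EMAAC"))] _ (by decide)]
      simp only [List.any_cons, List.any_nil, List.contains_cons, List.contains_nil,
        show (("DE" : String) == "MD") = false from by decide,
        show (("MD" : String) == "MD") = true from by decide,
        show (("VA" : String) == "MD") = false from by decide,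
        show (("NC" : String) == "MD") = false from by decide,
        show (("IL" : String) == "MD") = false from by decide,
        show (("OH" : String) == "MD") = false from by decide,
        show (("WV" : String) == "MD") = false from by decide,
        show (("KY" : String) == "MD") = false from by decide,
        show (("NJ" : String) == "MD") = false from by decide,
        show (("PA" : String) == "MD") = false from by decide,
        Bool.or_false, Bool.false_or, Bool.true_or, Bool.or_true]
      split_ifs <;> simp_all
    by_cases s2 : PySem.Str.upper (state.getD "") = "VA"
    · rw [s2, show pjmStates.get? "VA" = some ((1:Int), "DOM") from by decide]
      simp only []
      rw [min?_append_singleton, min?_eq_head?_of_sorted _ (pairwise_filter_snd pjmPoi.items (by decide) _),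
          show pjmPoi.items = ([("delmarva", ((0:Int), "DPL"))] ++ ([("dominion", ((1:Int), "DOM"))] ++ ([("comed", ((2:Int), "COMED"))] ++ ([("aep", ((3:Int), "AEP"))] ++ [("emaac", ((4:Int), "EMAAC"))])))) from by decide]
      simp only [head?_filter_append]
      rw [head?_filter_group ((0:Int), "DPL") [("delmarva", ((0:Int), "DPL"))] _ (by decide)]
      rw [head?_filter_group ((1:Int), "DOM") [("dominion", ((1:Int), "DOM"))] _ (by decide)]
      rw [head?_filter_group ((2:Int), "COMED") [("comed", ((2:Int), "COMED"))] _ (by decide)]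
      rw [head?_filter_group ((3:Int), "AEP") [("aep", ((3:Int), "AEP"))] _ (by decide)]
      rw [head?_filter_group ((4:Int), "EMAAC") [("emaac", ((4:Int), "EMAAC"))] _ (by decide)]
      simp only [List.any_cons, List.any_nil, List.contains_cons, List.contains_nil,
        show (("DE" : String) == "VA") = false from by decide,
        show (("MD" : String) == "VA") = false from by decide,
        show (("VA" : String) == "VA") = true from by decide,
        show (("NC" : String) == "VA") = false from by decide,
        show (("IL" : String) == "VA") = false from by decide,
        show (("OH" : String) == "VA") = false from by decide,
        show (("WV" : String) == "VA") = false from by decide,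
        show (("KY" : String) == "VA") = false from by decide,
        show (("NJ" : String) == "VA") = false from by decide,
        show (("PA" : String) == "VA") = false from by decide,
        Bool.or_false, Bool.false_or, Bool.true_or, Bool.or_true]
      split_ifs <;> simp_all
    by_cases s3 : PySem.Str.upper (state.getD "") = "NC"
    · rw [s3, show pjmStates.get? "NC" = some ((1:Int), "DOM") from by decide]
      simp only []
      rw [min?_append_singleton, min?_eq_head?_of_sorted _ (pairwise_filter_snd pjmPoi.items (by decide) _),
          show pjmPoi.items = ([("delmarva", ((0:Int), "DPL"))] ++ ([("dominion", ((1:Int), "DOM"))] ++ ([("comed", ((2:Int), "COMED"))] ++ ([("aep", ((3:Int), "AEP"))] ++ [("emaac", ((4:Int), "EMAAC"))])))) from by decide]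
      simp only [head?_filter_append]
      rw [head?_filter_group ((0:Int), "DPL") [("delmarva", ((0:Int), "DPL"))] _ (by decide)]
      rw [head?_filter_group ((1:Int), "DOM") [("dominion", ((1:Int), "DOM"))] _ (by decide)]
      rw [head?_filter_group ((2:Int), "COMED") [("comed", ((2:Int), "COMED"))] _ (by decide)]
      rw [head?_filter_group ((3:Int), "AEP") [("aep", ((3:Int), "AEP"))] _ (by decide)]
      rw [head?_filter_group ((4:Int), "EMAAC") [("emaac", ((4:Int), "EMAAC"))] _ (by decide)]
      simp only [List.any_cons, List.any_nil, List.contains_cons, List.contains_nil,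
        show (("DE" : String) == "NC") = false from by decide,
        show (("MD" : String) == "NC") = false from by decide,
        show (("VA" : String) == "NC") = false from by decide,
        show (("NC" : String) == "NC") = true from by decide,
        show (("IL" : String) == "NC") = false from by decide,
        show (("OH" : String) == "NC") = false from by decide,
        show (("WV" : String) == "NC") = false from by decide,
        show (("KY" : String) == "NC") = false from by decide,
        show (("NJ" : String) == "NC") = false from by decide,
        show (("PA" : String) == "NC") = false from by decide,
        Bool.or_false, Bool.false_or, Bool.true_or, Bool.or_true]
      split_ifs <;> simp_all
    by_cases s4 : PySem.Str.upper (state.getD "") = "IL"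
    · rw [s4, show pjmStates.get? "IL" = some ((2:Int), "COMED") from by decide]
      simp only []
      rw [min?_append_singleton, min?_eq_head?_of_sorted _ (pairwise_filter_snd pjmPoi.items (by decide) _),
          show pjmPoi.items = ([("delmarva", ((0:Int), "DPL"))] ++ ([("dominion", ((1:Int), "DOM"))] ++ ([("comed", ((2:Int), "COMED"))] ++ ([("aep", ((3:Int), "AEP"))] ++ [("emaac", ((4:Int), "EMAAC"))])))) from by decide]
      simp only [head?_filter_append]
      rw [head?_filter_group ((0:Int), "DPL") [("delmarva", ((0:Int), "DPL"))] _ (by decide)]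
      rw [head?_filter_group ((1:Int), "DOM") [("dominion", ((1:Int), "DOM"))] _ (by decide)]
      rw [head?_filter_group ((2:Int), "COMED") [("comed", ((2:Int), "COMED"))] _ (by decide)]
      rw [head?_filter_group ((3:Int), "AEP") [("aep", ((3:Int), "AEP"))] _ (by decide)]
      rw [head?_filter_group ((4:Int), "EMAAC") [("emaac", ((4:Int), "EMAAC"))] _ (by decide)]
      simp only [List.any_cons, List.any_nil, List.contains_cons, List.contains_nil,
        show (("DE" : String) == "IL") = false from by decide,
        show (("MD" : String) == "IL") = false from by decide,
        show (("VA" : String) == "IL") = false from by decide,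
        show (("NC" : String) == "IL") = false from by decide,
        show (("IL" : String) == "IL") = true from by decide,
        show (("OH" : String) == "IL") = false from by decide,
        show (("WV" : String) == "IL") = false from by decide,
        show (("KY" : String) == "IL") = false from by decide,
        show (("NJ" : String) == "IL") = false from by decide,
        show (("PA" : String) == "IL") = false from by decide,
        Bool.or_false, Bool.false_or, Bool.true_or, Bool.or_true]
      split_ifs <;> simp_all
    by_cases s5 : PySem.Str.upper (state.getD "") = "OH"
    · rw [s5, show pjmStates.get? "OH" = some ((3:Int), "AEP") from by decide]
      simp only []
      rw [min?_append_singleton, min?_eq_head?_of_sorted _ (pairwise_filter_snd pjmPoi.items (by decide) _),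
          show pjmPoi.items = ([("delmarva", ((0:Int), "DPL"))] ++ ([("dominion", ((1:Int), "DOM"))] ++ ([("comed", ((2:Int), "COMED"))] ++ ([("aep", ((3:Int), "AEP"))] ++ [("emaac", ((4:Int), "EMAAC"))])))) from by decide]
      simp only [head?_filter_append]
      rw [head?_filter_group ((0:Int), "DPL") [("delmarva", ((0:Int), "DPL"))] _ (by decide)]
      rw [head?_filter_group ((1:Int), "DOM") [("dominion", ((1:Int), "DOM"))] _ (by decide)]
      rw [head?_filter_group ((2:Int), "COMED") [("comed", ((2:Int), "COMED"))] _ (by decide)]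
      rw [head?_filter_group ((3:Int), "AEP") [("aep", ((3:Int), "AEP"))] _ (by decide)]
      rw [head?_filter_group ((4:Int), "EMAAC") [("emaac", ((4:Int), "EMAAC"))] _ (by decide)]
      simp only [List.any_cons, List.any_nil, List.contains_cons, List.contains_nil,
        show (("DE" : String) == "OH") = false from by decide,
        show (("MD" : String) == "OH") = false from by decide,
        show (("VA" : String) == "OH") = false from by decide,
        show (("NC" : String) == "OH") = false from by decide,
        show (("IL" : String) == "OH") = false from by decide,
        show (("OH" : String) == "OH") = true from by decide,
        show (("WV" : String) == "OH") = false from by decide,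
        show (("KY" : String) == "OH") = false from by decide,
        show (("NJ" : String) == "OH") = false from by decide,
        show (("PA" : String) == "OH") = false from by decide,
        Bool.or_false, Bool.false_or, Bool.true_or, Bool.or_true]
      split_ifs <;> simp_all
    by_cases s6 : PySem.Str.upper (state.getD "") = "WV"
    · rw [s6, show pjmStates.get? "WV" = some ((3:Int), "AEP") from by decide]
      simp only []
      rw [min?_append_singleton, min?_eq_head?_of_sorted _ (pairwise_filter_snd pjmPoi.items (by decide) _),
          show pjmPoi.items = ([("delmarva", ((0:Int), "DPL"))] ++ ([("dominion", ((1:Int), "DOM"))] ++ ([("comed", ((2:Int), "COMED"))] ++ ([("aep", ((3:Int), "AEP"))] ++ [("emaac", ((4:Int), "EMAAC"))])))) from by decide]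
      simp only [head?_filter_append]
      rw [head?_filter_group ((0:Int), "DPL") [("delmarva", ((0:Int), "DPL"))] _ (by decide)]
      rw [head?_filter_group ((1:Int), "DOM") [("dominion", ((1:Int), "DOM"))] _ (by decide)]
      rw [head?_filter_group ((2:Int), "COMED") [("comed", ((2:Int), "COMED"))] _ (by decide)]
      rw [head?_filter_group ((3:Int), "AEP") [("aep", ((3:Int), "AEP"))] _ (by decide)]
      rw [head?_filter_group ((4:Int), "EMAAC") [("emaac", ((4:Int), "EMAAC"))] _ (by decide)]
      simp only [List.any_cons, List.any_nil, List.contains_cons, List.contains_nil,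
        show (("DE" : String) == "WV") = false from by decide,
        show (("MD" : String) == "WV") = false from by decide,
        show (("VA" : String) == "WV") = false from by decide,
        show (("NC" : String) == "WV") = false from by decide,
        show (("IL" : String) == "WV") = false from by decide,
        show (("OH" : String) == "WV") = false from by decide,
        show (("WV" : String) == "WV") = true from by decide,
        show (("KY" : String) == "WV") = false from by decide,
        show (("NJ" : String) == "WV") = false from by decide,
        show (("PA" : String) == "WV") = false from by decide,
        Bool.or_false, Bool.false_or, Bool.true_or, Bool.or_true]
      split_ifs <;> simp_all
    by_cases s7 : PySem.Str.upper (state.getD "") = "KY"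
    · rw [s7, show pjmStates.get? "KY" = some ((3:Int), "AEP") from by decide]
      simp only []
      rw [min?_append_singleton, min?_eq_head?_of_sorted _ (pairwise_filter_snd pjmPoi.items (by decide) _),
          show pjmPoi.items = ([("delmarva", ((0:Int), "DPL"))] ++ ([("dominion", ((1:Int), "DOM"))] ++ ([("comed", ((2:Int), "COMED"))] ++ ([("aep", ((3:Int), "AEP"))] ++ [("emaac", ((4:Int), "EMAAC"))])))) from by decide]
      simp only [head?_filter_append]
      rw [head?_filter_group ((0:Int), "DPL") [("delmarva", ((0:Int), "DPL"))] _ (by decide)]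
      rw [head?_filter_group ((1:Int), "DOM") [("dominion", ((1:Int), "DOM"))] _ (by decide)]
      rw [head?_filter_group ((2:Int), "COMED") [("comed", ((2:Int), "COMED"))] _ (by decide)]
      rw [head?_filter_group ((3:Int), "AEP") [("aep", ((3:Int), "AEP"))] _ (by decide)]
      rw [head?_filter_group ((4:Int), "EMAAC") [("emaac", ((4:Int), "EMAAC"))] _ (by decide)]
      simp only [List.any_cons, List.any_nil, List.contains_cons, List.contains_nil,
        show (("DE" : String) == "KY") = false from by decide,
        show (("MD" : String) == "KY") = false from by decide,
        show (("VA" : String) == "KY") = false from by decide,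
        show (("NC" : String) == "KY") = false from by decide,
        show (("IL" : String) == "KY") = false from by decide,
        show (("OH" : String) == "KY") = false from by decide,
        show (("WV" : String) == "KY") = false from by decide,
        show (("KY" : String) == "KY") = true from by decide,
        show (("NJ" : String) == "KY") = false from by decide,
        show (("PA" : String) == "KY") = false from by decide,
        Bool.or_false, Bool.false_or, Bool.true_or, Bool.or_true]
      split_ifs <;> simp_all
    by_cases s8 : PySem.Str.upper (state.getD "") = "NJ"
    · rw [s8, show pjmStates.get? "NJ" = some ((4:Int), "EMAAC") from by decide]
      simp only []
      rw [min?_append_singleton, min?_eq_head?_of_sorted _ (pairwise_filter_snd pjmPoi.items (by decide) _),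
          show pjmPoi.items = ([("delmarva", ((0:Int), "DPL"))] ++ ([("dominion", ((1:Int), "DOM"))] ++ ([("comed", ((2:Int), "COMED"))] ++ ([("aep", ((3:Int), "AEP"))] ++ [("emaac", ((4:Int), "EMAAC"))])))) from by decide]
      simp only [head?_filter_append]
      rw [head?_filter_group ((0:Int), "DPL") [("delmarva", ((0:Int), "DPL"))] _ (by decide)]
      rw [head?_filter_group ((1:Int), "DOM") [("dominion", ((1:Int), "DOM"))] _ (by decide)]
      rw [head?_filter_group ((2:Int), "COMED") [("comed", ((2:Int), "COMED"))] _ (by decide)]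
      rw [head?_filter_group ((3:Int), "AEP") [("aep", ((3:Int), "AEP"))] _ (by decide)]
      rw [head?_filter_group ((4:Int), "EMAAC") [("emaac", ((4:Int), "EMAAC"))] _ (by decide)]
      simp only [List.any_cons, List.any_nil, List.contains_cons, List.contains_nil,
        show (("DE" : String) == "NJ") = false from by decide,
        show (("MD" : String) == "NJ") = false from by decide,
        show (("VA" : String) == "NJ") = false from by decide,
        show (("NC" : String) == "NJ") = false from by decide,
        show (("IL" : String) == "NJ") = false from by decide,
        show (("OH" : String) == "NJ") = false from by decide,
        show (("WV" : String) == "NJ") = false from by decide,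
        show (("KY" : String) == "NJ") = false from by decide,
        show (("NJ" : String) == "NJ") = true from by decide,
        show (("PA" : String) == "NJ") = false from by decide,
        Bool.or_false, Bool.false_or, Bool.true_or, Bool.or_true]
      split_ifs <;> simp_all
    by_cases s9 : PySem.Str.upper (state.getD "") = "PA"
    · rw [s9, show pjmStates.get? "PA" = some ((4:Int), "EMAAC") from by decide]
      simp only []
      rw [min?_append_singleton, min?_eq_head?_of_sorted _ (pairwise_filter_snd pjmPoi.items (by decide) _),
          show pjmPoi.items = ([("delmarva", ((0:Int), "DPL"))] ++ ([("dominion", ((1:Int), "DOM"))] ++ ([("comed", ((2:Int), "COMED"))] ++ ([("aep", ((3:Int), "AEP"))] ++ [("emaac", ((4:Int), "EMAAC"))])))) from by decide]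
      simp only [head?_filter_append]
      rw [head?_filter_group ((0:Int), "DPL") [("delmarva", ((0:Int), "DPL"))] _ (by decide)]
      rw [head?_filter_group ((1:Int), "DOM") [("dominion", ((1:Int), "DOM"))] _ (by decide)]
      rw [head?_filter_group ((2:Int), "COMED") [("comed", ((2:Int), "COMED"))] _ (by decide)]
      rw [head?_filter_group ((3:Int), "AEP") [("aep", ((3:Int), "AEP"))] _ (by decide)]
      rw [head?_filter_group ((4:Int), "EMAAC") [("emaac", ((4:Int), "EMAAC"))] _ (by decide)]
      simp only [List.any_cons, List.any_nil, List.contains_cons, List.contains_nil,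
        show (("DE" : String) == "PA") = false from by decide,
        show (("MD" : String) == "PA") = false from by decide,
        show (("VA" : String) == "PA") = false from by decide,
        show (("NC" : String) == "PA") = false from by decide,
        show (("IL" : String) == "PA") = false from by decide,
        show (("OH" : String) == "PA") = false from by decide,
        show (("WV" : String) == "PA") = false from by decide,
        show (("KY" : String) == "PA") = false from by decide,
        show (("NJ" : String) == "PA") = false from by decide,
        show (("PA" : String) == "PA") = true from by decide,
        Bool.or_false, Bool.false_or, Bool.true_or, Bool.or_true]
      split_ifs <;> simp_all
    · have hn : pjmStates.get? (PySem.Str.upper (state.getD "")) = none := by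
        rw [PySem.Dict.get?_eq_none_iff_not_mem_keys,
            show pjmStates.keys = ["DE", "MD", "VA", "NC", "IL", "OH", "WV", "KY", "NJ", "PA"] from by decide]
        simp [s0, s1, s2, s3, s4, s5, s6, s7, s8, s9]
      rw [hn]
      simp only []
      rw [min?_eq_head?_of_sorted _ (pairwise_filter_snd pjmPoi.items (by decide) _),
          show pjmPoi.items = ([("delmarva", ((0:Int), "DPL"))] ++ ([("dominion", ((1:Int), "DOM"))] ++ ([("comed", ((2:Int), "COMED"))] ++ ([("aep", ((3:Int), "AEP"))] ++ [("emaac", ((4:Int), "EMAAC"))])))) from by decide]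
      simp only [head?_filter_append]
      rw [head?_filter_group ((0:Int), "DPL") [("delmarva", ((0:Int), "DPL"))] _ (by decide)]
      rw [head?_filter_group ((1:Int), "DOM") [("dominion", ((1:Int), "DOM"))] _ (by decide)]
      rw [head?_filter_group ((2:Int), "COMED") [("comed", ((2:Int), "COMED"))] _ (by decide)]
      rw [head?_filter_group ((3:Int), "AEP") [("aep", ((3:Int), "AEP"))] _ (by decide)]
      rw [head?_filter_group ((4:Int), "EMAAC") [("emaac", ((4:Int), "EMAAC"))] _ (by decide)]
      have c0 : (("DE" : String) == PySem.Str.upper (state.getD "")) = false := beq_eq_false_iff_ne.mpr (fun h => s0 h.symm)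
      have c1 : (("MD" : String) == PySem.Str.upper (state.getD "")) = false := beq_eq_false_iff_ne.mpr (fun h => s1 h.symm)
      have c2 : (("VA" : String) == PySem.Str.upper (state.getD "")) = false := beq_eq_false_iff_ne.mpr (fun h => s2 h.symm)
      have c3 : (("NC" : String) == PySem.Str.upper (state.getD "")) = false := beq_eq_false_iff_ne.mpr (fun h => s3 h.symm)
      have c4 : (("IL" : String) == PySem.Str.upper (state.getD "")) = false := beq_eq_false_iff_ne.mpr (fun h => s4 h.symm)
      have c5 : (("OH" : String) == PySem.Str.upper (state.getD "")) = false := beq_eq_false_iff_ne.mpr (fun h => s5 h.symm)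
      have c6 : (("WV" : String) == PySem.Str.upper (state.getD "")) = false := beq_eq_false_iff_ne.mpr (fun h => s6 h.symm)
      have c7 : (("KY" : String) == PySem.Str.upper (state.getD "")) = false := beq_eq_false_iff_ne.mpr (fun h => s7 h.symm)
      have c8 : (("NJ" : String) == PySem.Str.upper (state.getD "")) = false := beq_eq_false_iff_ne.mpr (fun h => s8 h.symm)
      have c9 : (("PA" : String) == PySem.Str.upper (state.getD "")) = false := beq_eq_false_iff_ne.mpr (fun h => s9 h.symm)
      simp only [List.any_cons, List.any_nil, List.contains_cons, List.contains_nil,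
        c0, c1, c2, c3, c4, c5, c6, c7, c8, c9, Bool.or_false, Bool.false_or]
      split_ifs <;> simp_all
  by_cases h4 : region = "CAISO"
  · subst h4
    simp only [show (("CAISO" : String) == "ERCOT") = false from by decide,
      show (("CAISO" : String) == "NYISO") = false from by decide,
      show (("CAISO" : String) == "PJM") = false from by decide, beq_self_eq_true,
      Bool.false_eq_true, if_false, if_true]
    rw [show poiZones.get? "CAISO" = some caisoPoi from by decide,
        show stateZones.get? "CAISO" = none from by decide,
        show defaultZones.get? "CAISO" = some "ZP26" from by decide]
    simp only [Option.getD_some, Option.getD_none]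
    rw [show (PySem.Dict.empty : PySem.Dict String (Int × String)).get? (PySem.Str.upper (state.getD "")) = none from rfl]
    simp only []
    rw [min?_eq_head?_of_sorted _ (pairwise_filter_snd caisoPoi.items (by decide) _),
        show caisoPoi.items = ([("san diego", ((0:Int), "SP15")), ("imperial", ((0:Int), "SP15")), ("riverside", ((0:Int), "SP15"))] ++ [("san francisco", ((1:Int), "NP15")), ("oakland", ((1:Int), "NP15")), ("sacramento", ((1:Int), "NP15"))]) from by decide]
    simp only [head?_filter_append]
    rw [head?_filter_group ((0:Int), "SP15") [("san diego", ((0:Int), "SP15")), ("imperial", ((0:Int), "SP15")), ("riverside", ((0:Int), "SP15"))] _ (by decide)]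
    rw [head?_filter_group ((1:Int), "NP15") [("san francisco", ((1:Int), "NP15")), ("oakland", ((1:Int), "NP15")), ("sacramento", ((1:Int), "NP15"))] _ (by decide)]
    simp only [List.any_cons, List.any_nil, Bool.or_false]
    split_ifs <;> simp_all
  · have hp : poiZones.get? region = none := by
      rw [PySem.Dict.get?_eq_none_iff_not_mem_keys,
          show poiZones.keys = ["ERCOT", "NYISO", "PJM", "CAISO"] from by decide]
      simp [h1, h2, h3, h4]
    have hs : stateZones.get? region = none := by
      rw [PySem.Dict.get?_eq_none_iff_not_mem_keys, show stateZones.keys = ["PJM"] from by decide]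
      simp [h3]
    have hd : defaultZones.get? region = none := by
      rw [PySem.Dict.get?_eq_none_iff_not_mem_keys,
          show defaultZones.keys = ["ERCOT", "NYISO", "PJM", "CAISO"] from by decide]
      simp [h1, h2, h3, h4]
    rw [hp, hs, hd]
    simp [beq_iff_eq, h1, h2, h3, h4, PySem.List.min?, PySem.Dict.empty, PySem.Dict.items,
      PySem.Dict.get?]
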